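-- pv_equiv track=rewrite | github.com/datawire/datawire-common | container.py | ancestors
-- ===== SOURCE A (Python) =====
-- def ancestors(address):
--     yield address
--     if address is None: return
--     address = address.split("?", 1)[0]
--     path = address.split("/")[:-1]
--     while path:
--         addr = "/".join(path)
--         yield "%s/" % addr
--         yield addr
--         path.pop()
-- ===== SOURCE B (Python) =====
-- def ancestors(address):
--     yield address
--     if address is None:
--         return
--     s = address.split("?", 1)[0]
--     idx = s.rfind("/")
--     while idx != -1:
--         addr = s[:idx]
--         yield addr + "/"
--         yield addr
--         s = addr
--         idx = s.rfind("/")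
-- ===== Notes on version B (the rewrite author's own statement) =====
-- stated objective: alternative
-- what changed: B never builds the component list A pops from and re-joins: it yields the raw address, strips the query once, then walks the remaining string itself with rfind and a prefix slice, each ancestor becoming the next string to scan.
import Mathlib
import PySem

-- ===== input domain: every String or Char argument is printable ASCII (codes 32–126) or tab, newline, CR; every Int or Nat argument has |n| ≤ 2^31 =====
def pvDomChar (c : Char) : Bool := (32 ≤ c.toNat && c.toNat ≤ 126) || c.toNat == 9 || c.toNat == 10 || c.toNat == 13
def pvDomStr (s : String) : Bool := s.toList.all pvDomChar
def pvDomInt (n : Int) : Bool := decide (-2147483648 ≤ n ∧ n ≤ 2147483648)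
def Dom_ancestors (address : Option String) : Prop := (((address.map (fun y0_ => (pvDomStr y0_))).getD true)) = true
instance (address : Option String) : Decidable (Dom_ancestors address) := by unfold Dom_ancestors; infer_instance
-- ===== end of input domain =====

-- B replaces A's pop-and-rejoin over a component list by navigating the string with rfind/slice (alternative decomposition, same cost).


-- shared helper: address.split("?", 1)[0]  ('?' is a nonempty separator, so the split is `some` of a
-- nonempty list and the [0] indexing never raises; the `.getD` defaults are therefore never taken)
def pvStripQuery (a : String) : List Char :=
  (PySem.List.pyGet? ((PySem.Chars.splitMax? a.toList ['?'] 1).getD []) 0).getD []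

-- ===== PORT A =====
-- while path: addr = "/".join(path); yield "%s/" % addr; yield addr; path.pop()
def ancestorsLoopA (path : List (List Char)) : List (Option String) :=
  if h : path = [] then []
  else
    some (String.mk (PySem.Chars.join ['/'] path ++ ['/'])) ::
    some (String.mk (PySem.Chars.join ['/'] path)) ::
    ancestorsLoopA path.dropLast
termination_by path.length
decreasing_by
  have := List.length_pos_of_ne_nil h
  simp only [List.length_dropLast]; omega

def ancestors (address : Option String) : List (Option String) :=
  address ::
  match address with
  | none => []
  | some a =>
    -- path = address.split("/")[:-1]   ('/' nonempty, so split? is `some` and .getD is never taken)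
    ancestorsLoopA
      (PySem.List.slice ((PySem.Chars.split? (pvStripQuery a) ['/']).getD []) none (some (-1)))

-- ===== PORT B =====
-- termination fact the port needs: the sliced prefix s[:idx] is strictly shorter than s
theorem pvRfindGo_cases (s : List Char) (k : Nat) :
    PySem.Chars.rfind.go s ['/'] k = -1 ∨
      ∃ j : Nat, PySem.Chars.rfind.go s ['/'] k = (j : Int) ∧ s[j]? = some '/' := by
  induction k with
  | zero =>
    rw [PySem.Chars.rfind.go.eq_def]
    by_cases hp : List.isPrefixOf ['/'] s = true
    · right; refine ⟨0, by simp [hp], ?_⟩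
      cases s with
      | nil => simp [List.isPrefixOf] at hp
      | cons c t =>
        simp [List.isPrefixOf] at hp
        simp [hp.symm]
    · left; simp [hp]
  | succ j ih =>
    rw [PySem.Chars.rfind.go.eq_def]
    by_cases hp : List.isPrefixOf ['/'] (List.drop (j + 1) s) = true
    · right; refine ⟨j + 1, by simp [hp], ?_⟩
      rcases hd : List.drop (j + 1) s with _ | ⟨c, t⟩
      · simp [hd, List.isPrefixOf] at hp
      · have : s[j + 1]? = some c := by
          rw [← List.head?_drop, hd]; rfl
        simp [hd, List.isPrefixOf] at hp
        simp [this, hp.symm]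
    · simp only [hp, if_false]
      exact ih

theorem pvLoopB_dec (s : List Char) (h : ¬ PySem.Chars.rfind s ['/'] = -1) :
    (PySem.List.slice s none (some (PySem.Chars.rfind s ['/']))).length < s.length := by
  rcases pvRfindGo_cases s s.length with hc | ⟨j, hj, hget⟩
  · exact absurd (by simpa [PySem.Chars.rfind] using hc) h
  · have hlen : j < s.length := (List.getElem?_eq_some_iff.mp hget).1
    have hr : PySem.Chars.rfind s ['/'] = (j : Int) := by simpa [PySem.Chars.rfind] using hj
    rw [hr, PySem.List.slice_to s (by positivity), Int.toNat_natCast, List.length_take]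
    omega

def ancestorsLoopB (s : List Char) : List (Option String) :=
  if h : PySem.Chars.rfind s ['/'] = -1 then []
  else
    some (String.mk (PySem.List.slice s none (some (PySem.Chars.rfind s ['/'])) ++ ['/'])) ::
    some (String.mk (PySem.List.slice s none (some (PySem.Chars.rfind s ['/'])))) ::
    ancestorsLoopB (PySem.List.slice s none (some (PySem.Chars.rfind s ['/'])))
termination_by s.length
decreasing_by exact pvLoopB_dec s h

def ancestors_alt (address : Option String) : List (Option String) :=
  address ::
  match address with
  | none => []
  | some a => ancestorsLoopB (pvStripQuery a)

-- ===== PRECONDITION & SPEC =====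
def Spec_ancestors (address : Option String) (out : List (Option String)) : Prop := out = ancestors_alt address
instance (address : Option String) (out : List (Option String)) : Decidable (Spec_ancestors address out) := by unfold Spec_ancestors; infer_instance

-- ===== CLAIM (what is proved, stated in full; the proofs are below) =====
def Claim_equal_ancestors : Prop := ∀ (address : Option String), Dom_ancestors address → Spec_ancestors address (ancestors address)

-- ===== LEMMAS AND PROOFS =====

-- PySem's fueled splitter agrees with Mathlib's splitOnP for the single-char separator '/'
theorem pvSplitOnGo (fuel : Nat) : ∀ (l cur : List Char) (acc : List (List Char)), l.length ≤ fuel →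
    PySem.Chars.splitOn.go ['/'] fuel l cur acc =
      acc.reverse ++ (List.splitOnP (· == '/') l).modifyHead (cur.reverse ++ ·) := by
  induction fuel with
  | zero =>
    intro l cur acc hl
    have : l = [] := List.length_eq_zero_iff.mp (Nat.le_zero.mp hl)
    subst this
    rw [PySem.Chars.splitOn.go.eq_def]
    simp [List.splitOnP_nil]
  | succ fuel ih =>
    intro l cur acc hl
    rw [PySem.Chars.splitOn.go.eq_def]
    cases l with
    | nil => simp [List.splitOnP_nil]
    | cons c rest =>
      by_cases hc : c = '/'
      · subst hc
        have hp : List.isPrefixOf ['/'] ('/' :: rest) = true := by simp [List.isPrefixOf]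
        simp only [hp, if_true, List.length_singleton, List.drop_one, List.tail_cons]
        rw [ih rest [] _ (by simpa using hl)]
        rcases hP : List.splitOnP (· == '/') rest with _ | ⟨h0, t⟩
        · exact absurd hP (List.splitOnP_ne_nil _ rest)
        · simp [List.splitOnP_cons, hP]
      · have hp : List.isPrefixOf ['/'] (c :: rest) = false := by
          simp [List.isPrefixOf]; exact fun h => hc h.symm
        simp only [hp, Bool.false_eq_true, if_false]
        rw [ih rest (c :: cur) _ (by simpa using hl)]
        rcases hP : List.splitOnP (· == '/') rest with _ | ⟨h0, t⟩
        · exact absurd hP (List.splitOnP_ne_nil _ rest)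
        · simp [List.splitOnP_cons, hP, hc]

theorem pvSplitOn_eq (s : List Char) :
    PySem.Chars.splitOn s ['/'] = List.splitOnP (· == '/') s := by
  rw [PySem.Chars.splitOn, pvSplitOnGo (s.length + 1) s [] [] (by omega)]
  rcases hP : List.splitOnP (· == '/') s with _ | ⟨h0, t⟩
  · exact absurd hP (List.splitOnP_ne_nil _ s)
  · simp

-- no piece produced by splitting on '/' contains '/'
theorem pvSplitOn_pieces (s : List Char) : ∀ l ∈ List.splitOnP (· == '/') s, ('/' : Char) ∉ l := by
  induction s with
  | nil => simp [List.splitOnP_nil]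
  | cons c rest ih =>
    intro l hl
    rw [List.splitOnP_cons] at hl
    by_cases hc : c = '/'
    · rw [if_pos (by simp [hc])] at hl
      rcases List.mem_cons.mp hl with rfl | hl
      · simp
      · exact ih l hl
    · rw [if_neg (by simp [hc])] at hl
      obtain ⟨h0, t, hP⟩ := List.exists_cons_of_ne_nil (List.splitOnP_ne_nil (· == '/') rest)
      rw [hP] at hl
      simp only [List.modifyHead_cons, List.mem_cons] at hl
      rcases hl with rfl | hl
      · intro hm
        rcases List.mem_cons.mp hm with h | h
        · exact hc h.symm
        · exact ih h0 (hP ▸ List.mem_cons_self) h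
      · exact ih l (hP ▸ List.mem_cons_of_mem _ hl)

theorem pvIntercalate_snoc : ∀ (ps : List (List Char)) (p q : List Char),
    [('/' : Char)].intercalate ((ps ++ [p]) ++ [q]) =
      [('/' : Char)].intercalate (ps ++ [p]) ++ '/' :: q := by
  intro ps
  induction ps with
  | nil => intro p q; simp [List.intercalate]
  | cons a ps ih =>
    intro p q
    rcases ps with _ | ⟨b, ps⟩
    · simp [List.intercalate]
    · have h1 := ih p q
      simp only [List.cons_append] at *
      simp [List.intercalate] at h1 ⊢
      simp [h1]

theorem pvRfindGo_eq (s : List Char) (i : Nat) (hi : s[i]? = some '/')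
    (hmax : ∀ j : Nat, i < j → s[j]? ≠ some '/') :
    ∀ k : Nat, i ≤ k → PySem.Chars.rfind.go s ['/'] k = (i : Int) := by
  intro k
  induction k with
  | zero =>
    intro hik
    have : i = 0 := Nat.le_zero.mp hik
    subst this
    rw [PySem.Chars.rfind.go.eq_def]
    have : List.isPrefixOf ['/'] s = true := by
      cases s with
      | nil => simp at hi
      | cons c t => simp at hi; simp [List.isPrefixOf, hi]
    simp [this]
  | succ j ih =>
    intro hik
    rw [PySem.Chars.rfind.go.eq_def]
    by_cases hij : i = j + 1
    · have hpref : List.isPrefixOf ['/'] (List.drop (j + 1) s) = true := by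
        rcases hd : List.drop (j + 1) s with _ | ⟨c, t⟩
        · have hnone : s[j + 1]? = none := by rw [← List.head?_drop, hd]; rfl
          rw [← hij, hi] at hnone; cases hnone
        · have hc : s[j + 1]? = some c := by rw [← List.head?_drop, hd]; rfl
          rw [← hij, hi] at hc
          have hcc : c = '/' := by injection hc with h; exact h.symm
          simp [List.isPrefixOf, hcc]
      show (if ['/'].isPrefixOf (List.drop (j + 1) s) = true then ((j + 1 : Nat) : Int)
            else PySem.Chars.rfind.go s ['/'] j) = (i : Int)
      rw [if_pos hpref, hij]
    · have hlt : i ≤ j := by omega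
      have hpref : List.isPrefixOf ['/'] (List.drop (j + 1) s) = false := by
        rcases hd : List.drop (j + 1) s with _ | ⟨c, t⟩
        · simp [List.isPrefixOf]
        · have hc : s[j + 1]? = some c := by rw [← List.head?_drop, hd]; rfl
          have hcc : c ≠ '/' := fun h => hmax (j + 1) (by omega) (by rw [hc, h])
          simp [List.isPrefixOf]
          exact fun h => hcc h.symm
      show (if ['/'].isPrefixOf (List.drop (j + 1) s) = true then ((j + 1 : Nat) : Int)
            else PySem.Chars.rfind.go s ['/'] j) = (i : Int)
      rw [if_neg (by simp [hpref])]
      exact ih hlt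

theorem pvRfindGo_neg (s : List Char) (hfree : ('/' : Char) ∉ s) :
    ∀ k : Nat, PySem.Chars.rfind.go s ['/'] k = -1 := by
  intro k
  rcases pvRfindGo_cases s k with h | ⟨j, hj, hget⟩
  · exact h
  · exact absurd (List.mem_of_getElem? hget) hfree

-- the heart of the proof: B's rfind/slice walk over the joined string mirrors A's pop-and-rejoin walk
theorem pvMain : ∀ (n : Nat) (ps : List (List Char)) (q : List Char), ps.length = n →
    (∀ p ∈ ps, ('/' : Char) ∉ p) → ('/' : Char) ∉ q →
    ancestorsLoopB ([('/' : Char)].intercalate (ps ++ [q])) = ancestorsLoopA ps := by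
  intro n
  induction n with
  | zero =>
    intro ps q hn hps hq
    have : ps = [] := List.length_eq_zero_iff.mp hn
    subst this
    rw [ancestorsLoopB, ancestorsLoopA]
    have hsing : [('/' : Char)].intercalate [q] = q := by simp [List.intercalate]
    have : PySem.Chars.rfind ([('/' : Char)].intercalate [q]) ['/'] = -1 := by
      rw [hsing, PySem.Chars.rfind]
      exact pvRfindGo_neg q hq _
    simp [List.nil_append, this]
  | succ n ih =>
    intro ps q hn hps hq
    rcases List.eq_nil_or_concat ps with rfl | ⟨ps', p, rfl⟩
    · simp at hn
    · simp only [List.concat_eq_append] at hn hps ⊢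
      have hp : ('/' : Char) ∉ p := hps p (by simp)
      have hps' : ∀ x ∈ ps', ('/' : Char) ∉ x := fun x hx => hps x (by simp [hx])
      set I := [('/' : Char)].intercalate (ps' ++ [p]) with hI
      have hsnoc := pvIntercalate_snoc ps' p q
      -- rfind of I ++ '/' :: q is I.length
      have hget : (I ++ '/' :: q)[I.length]? = some '/' := by
        rw [List.getElem?_append_right (le_refl _)]
        simp
      have hmax : ∀ j : Nat, I.length < j → (I ++ '/' :: q)[j]? ≠ some '/' := by
        intro j hj hsome
        have hjlen : j < I.length + (q.length + 1) := by
          have := (List.getElem?_eq_some_iff.mp hsome).1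
          simpa using this
        rw [List.getElem?_append_right (by omega)] at hsome
        have hk : j - I.length ≠ 0 := by omega
        obtain ⟨m, hm⟩ := Nat.exists_eq_succ_of_ne_zero hk
        rw [hm] at hsome
        have hqm : q[m]? = some '/' := by simpa using hsome
        exact hq (List.mem_of_getElem? hqm)
      have hrf : PySem.Chars.rfind (I ++ '/' :: q) ['/'] = (I.length : Int) := by
        rw [PySem.Chars.rfind]
        exact pvRfindGo_eq _ I.length hget (fun j hj => hmax j hj) _ (by simp)
      have hslice : PySem.List.slice (I ++ '/' :: q) none (some ((I.length : Nat) : Int)) = I := by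
        rw [PySem.List.slice_to _ (by positivity), Int.toNat_natCast, List.take_left]
      rw [hsnoc, ancestorsLoopB]
      have hne : ¬ PySem.Chars.rfind (I ++ '/' :: q) ['/'] = -1 := by rw [hrf]; omega
      rw [dif_neg hne, hrf, hslice]
      rw [ancestorsLoopA]
      rw [dif_neg (by simp : ¬ (ps' ++ [p] = []))]
      have hjoin : PySem.Chars.join ['/'] (ps' ++ [p]) = I := by
        simp [PySem.Chars.join, hI]
      rw [hjoin, List.dropLast_concat]
      rw [ih ps' p (by simpa using hn) hps' hp]

theorem pvLoopB_eq_loopA (s1 : List Char) :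
    ancestorsLoopB s1 =
      ancestorsLoopA (PySem.List.slice ((PySem.Chars.split? s1 ['/']).getD []) none (some (-1))) := by
  have hsplit : (PySem.Chars.split? s1 ['/']).getD [] = List.splitOnP (· == '/') s1 := by
    simp [PySem.Chars.split?, pvSplitOn_eq]
  rw [hsplit, PySem.List.slice_to_neg_one]
  set P := List.splitOnP (· == '/') s1 with hP
  have hne : P ≠ [] := List.splitOnP_ne_nil _ s1
  have hdecomp : P.dropLast ++ [P.getLast hne] = P := List.dropLast_append_getLast hne
  have hinterc : [('/' : Char)].intercalate P = s1 := by
    have := List.intercalate_splitOn s1 '/'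
    simpa [List.splitOn, hP] using this
  have hpieces := pvSplitOn_pieces s1
  have hq : ('/' : Char) ∉ P.getLast hne := hpieces _ (List.getLast_mem hne)
  have hps : ∀ p ∈ P.dropLast, ('/' : Char) ∉ p := fun p hp =>
    hpieces p (List.mem_of_mem_dropLast hp)
  have := pvMain P.dropLast.length P.dropLast (P.getLast hne) rfl hps hq
  rw [hdecomp, hinterc] at this
  exact this

-- ===== VERDICT (by name: the statement is the Claim_ definition above) =====
theorem ancestors_spec : Claim_equal_ancestors := by
  intro address _
  unfold Spec_ancestors ancestors ancestors_alt
  cases address with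
  | none => rfl
  | some a => simp only [pvLoopB_eq_loopA]
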